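-- pv_equiv track=rewrite | github.com/EthanKoland/CyberGit | Documents/GitHub/CyberGit/6Summer.py | createCipher
-- ===== SOURCE A (Python) =====
-- def createCipher(start):
--     alpha = "ABCDEFGHIJKLMNOPQRSTUVWXYZ"
--     if(type(start) == str):
--         start = alpha.find(start)
--
--     text = ""
--
--     for x in range(26):
--         text = text + (alpha[(start+x) % 26])
--     return text
-- ===== SOURCE B (Python) =====
-- def createCipher(start):
--     alpha = "ABCDEFGHIJKLMNOPQRSTUVWXYZ"
--     s = start % 26
--     return alpha[s:] + alpha[:s]
-- ===== Notes on version B (the rewrite author's own statement) =====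
-- stated objective: idiomatic
-- what changed: Replaces the 26-iteration character-by-character modular indexing loop with a closed-form rotation: compute s = start % 26 once and return the two slice halves alpha[s:] + alpha[:s].
import Mathlib
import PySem

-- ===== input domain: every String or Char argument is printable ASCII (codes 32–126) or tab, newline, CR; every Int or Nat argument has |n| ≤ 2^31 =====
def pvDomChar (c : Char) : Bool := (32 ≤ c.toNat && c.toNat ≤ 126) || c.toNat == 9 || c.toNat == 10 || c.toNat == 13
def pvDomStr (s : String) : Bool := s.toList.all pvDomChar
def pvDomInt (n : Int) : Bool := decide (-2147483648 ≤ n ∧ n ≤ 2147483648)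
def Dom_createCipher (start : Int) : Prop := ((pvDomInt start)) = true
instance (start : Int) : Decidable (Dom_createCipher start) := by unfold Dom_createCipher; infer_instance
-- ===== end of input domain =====

-- ===== PORT A =====
-- B rotates the alphabet by two slices instead of A's 26-step modular indexing loop (idiomatic closed form).
-- (A's `type(start) == str` guard is dead under the Int signature and is not ported.)
def pvAlpha : List Char := "ABCDEFGHIJKLMNOPQRSTUVWXYZ".toList

def createCipher (start : Int) : String :=
  String.ofList ((PySem.List.pyRange 0 26 1).foldl
    (fun text x => text ++ [PySem.List.pyGetD pvAlpha (PySem.Int.mod (start + x) 26) 'A']) [])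

-- ===== PORT B =====
def createCipher_alt (start : Int) : String :=
  let s := PySem.Int.mod start 26
  String.ofList (PySem.List.slice pvAlpha (some s) none ++ PySem.List.slice pvAlpha none (some s))

-- ===== PRECONDITION & SPEC =====
def Spec_createCipher (start : Int) (out : String) : Prop := out = createCipher_alt start
instance (start : Int) (out : String) : Decidable (Spec_createCipher start out) := by unfold Spec_createCipher; infer_instance

-- ===== CLAIM (what is proved, stated in full; the proofs are below) =====
def Claim_equal_createCipher : Prop := ∀ (start : Int), Dom_createCipher start → Spec_createCipher start (createCipher start)

-- ===== LEMMAS AND PROOFS =====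
theorem pvMod_idx (start x : Int) :
    PySem.Int.mod (start + x) 26 = PySem.Int.mod (PySem.Int.mod start 26 + x) 26 := by
  simp

theorem pvMod_idem (start : Int) :
    PySem.Int.mod (PySem.Int.mod start 26) 26 = PySem.Int.mod start 26 := by
  simp

theorem pvA_mod (start : Int) : createCipher start = createCipher (PySem.Int.mod start 26) := by
  unfold createCipher
  have : (fun (text : List Char) (x : Int) =>
            text ++ [PySem.List.pyGetD pvAlpha (PySem.Int.mod (start + x) 26) 'A'])
       = (fun (text : List Char) (x : Int) =>
            text ++ [PySem.List.pyGetD pvAlpha (PySem.Int.mod (PySem.Int.mod start 26 + x) 26) 'A']) := by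
    funext t x
    rw [pvMod_idx]
  rw [this]

theorem pvB_mod (start : Int) : createCipher_alt start = createCipher_alt (PySem.Int.mod start 26) := by
  unfold createCipher_alt
  rw [pvMod_idem]

-- ===== VERDICT (by name: the statement is the Claim_ definition above) =====
theorem createCipher_spec : Claim_equal_createCipher := by
  intro start _
  unfold Spec_createCipher
  rw [pvA_mod, pvB_mod]
  have h0 : 0 ≤ PySem.Int.mod start 26 := PySem.Int.mod_nonneg _ (by norm_num)
  have h1 : PySem.Int.mod start 26 < 26 := PySem.Int.mod_lt _ (by norm_num)
  set r := PySem.Int.mod start 26 with hr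
  interval_cases r <;> decide
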